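-- pv_equiv track=rewrite | github.com/digihealthucsd/Multi-agent-self-triage-system | Evaluation/flowchart-retrieval/flowchart_retrieval.py | top_n_retrieved
-- ===== SOURCE A (Python) =====
-- def top_n_retrieved(retriever_output, label, n):
--     """ Check whether the correct flowchart is in the top n retrieved results."""
--
--     if any(label in item['content'] for item in retriever_output) == False:
--         return 0
--     else:
--         for i in range(n):
--             current = retriever_output[i]
--             if label in current['content']:
--                 return i+1
-- ===== SOURCE B (Python) =====
-- def top_n_retrieved(retriever_output, label, n):
--     """Check whether the correct flowchart is in the top n retrieved results."""
--     index = None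
--     for i, item in enumerate(retriever_output):
--         if label in item['content']:
--             index = i
--             break
--     if index is None:
--         return 0
--     if index < n:
--         return index + 1
--     return None
-- ===== Notes on version B (the rewrite author's own statement) =====
-- stated objective: simpler
-- what changed: Replaces A's two scans (an any() membership pass plus a range(n) index loop) with a single enumerate pass that locates the first matching item and then decides the result arithmetically from its index.
import Mathlib
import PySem

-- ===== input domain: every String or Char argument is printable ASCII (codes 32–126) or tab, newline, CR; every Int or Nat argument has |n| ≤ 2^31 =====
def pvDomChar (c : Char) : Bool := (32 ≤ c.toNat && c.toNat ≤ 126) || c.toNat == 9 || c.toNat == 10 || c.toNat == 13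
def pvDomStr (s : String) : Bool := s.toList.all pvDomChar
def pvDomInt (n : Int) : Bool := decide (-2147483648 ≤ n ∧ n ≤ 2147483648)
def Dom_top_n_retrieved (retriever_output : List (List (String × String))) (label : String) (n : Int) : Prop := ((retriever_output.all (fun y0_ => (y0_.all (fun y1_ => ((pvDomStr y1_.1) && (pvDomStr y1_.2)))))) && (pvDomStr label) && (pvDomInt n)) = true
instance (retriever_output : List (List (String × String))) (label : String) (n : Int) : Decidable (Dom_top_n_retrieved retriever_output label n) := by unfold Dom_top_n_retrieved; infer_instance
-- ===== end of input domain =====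

-- B replaces A's two scans (any() + a range(n) index loop) with one enumerate pass; objective: simpler.

-- shared primitive: `label in item['content']` with the dict read as Python does
-- (missing 'content' key = KeyError, excluded by Pre_; the default "" is never reached inside Pre_)
def pvMatch (label : String) (item : List (String × String)) : Bool :=
  PySem.Str.isIn label ((PySem.Dict.mk item).getD "content" "")

-- ===== PORT A =====
-- the `for i in range(n)` loop with its early return; pyGet? none = IndexError (unreachable once any() was true)
def pvALoop (ro : List (List (String × String))) (label : String) : List Int → Option Int
  | [] => none
  | i :: rest =>
    match PySem.List.pyGet? ro i with
    | none => none
    | some current => if pvMatch label current then some (i + 1) else pvALoop ro label rest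

def top_n_retrieved (retriever_output : List (List (String × String))) (label : String) (n : Int) : Option Int :=
  if (retriever_output.any (pvMatch label)) = false then some 0
  else pvALoop retriever_output label (PySem.List.pyRange 0 n 1)

-- ===== PORT B =====
-- the single `for i, item in enumerate(...)` pass with break at the first match
def pvBLoop (label : String) : List (List (String × String)) → Int → Option Int
  | [], _ => none
  | item :: rest, i => if pvMatch label item then some i else pvBLoop label rest (i + 1)

def top_n_retrieved_alt (retriever_output : List (List (String × String))) (label : String) (n : Int) : Option Int :=
  match pvBLoop label retriever_output 0 with
  | none => some 0
  | some index => if index < n then some (index + 1) else none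

-- ===== PRECONDITION & SPEC =====
-- Pre_ excludes exactly the inputs where Python A raises KeyError: some item scanned before the
-- first label-containing item (or any item, when none contains label) has no 'content' key.
def Pre_top_n_retrieved (retriever_output : List (List (String × String))) (label : String) (_n : Int) : Prop :=
  ∀ i, (h : i < retriever_output.length) →
    (∀ j, (hj : j < i) → pvMatch label (retriever_output[j]) = false) →
    ((PySem.Dict.mk (retriever_output[i])).get? "content").isSome = true
instance (retriever_output : List (List (String × String))) (label : String) (n : Int) : Decidable (Pre_top_n_retrieved retriever_output label n) := by unfold Pre_top_n_retrieved; infer_instance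
def pvWitness_top_n_retrieved : (List (List (String × String))) × String × Int := ([[("content", "x")]], "x", 1)

def Spec_top_n_retrieved (retriever_output : List (List (String × String))) (label : String) (n : Int) (out : Option Int) : Prop := out = top_n_retrieved_alt retriever_output label n
instance (retriever_output : List (List (String × String))) (label : String) (n : Int) (out : Option Int) : Decidable (Spec_top_n_retrieved retriever_output label n out) := by unfold Spec_top_n_retrieved; infer_instance

-- ===== CLAIM (what is proved, stated in full; the proofs are below) =====
def Claim_equal_top_n_retrieved : Prop := ∀ (retriever_output : List (List (String × String))) (label : String) (n : Int), Dom_top_n_retrieved retriever_output label n → Pre_top_n_retrieved retriever_output label n → Spec_top_n_retrieved retriever_output label n (top_n_retrieved retriever_output label n)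

-- ===== LEMMAS AND PROOFS =====

-- B's loop returns the first matching index, shifted by the running counter
theorem pvBLoop_eq_findIdx? (label : String) (ro : List (List (String × String))) (i : Int) :
    pvBLoop label ro i = (ro.findIdx? (pvMatch label)).map (fun k => i + (k : Int)) := by
  induction ro generalizing i with
  | nil => rfl
  | cons x xs ih =>
    cases hx : pvMatch label x with
    | true => simp [pvBLoop, List.findIdx?_cons, hx]
    | false =>
      simp only [pvBLoop, hx, List.findIdx?_cons, Bool.false_eq_true, if_false, ih]
      cases h : xs.findIdx? (pvMatch label) <;> simp <;> omega

-- A's range(n) loop, when the first match sits at index k and the scan has reached a ≤ k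
theorem pvALoop_range (ro : List (List (String × String))) (label : String) (n : Int) (k : Nat)
    (hk : ro.findIdx? (pvMatch label) = some k) :
    ∀ (m an : Nat), an + m = k →
      pvALoop ro label (PySem.List.pyRange (an : Int) n 1) =
        if (k : Int) < n then some ((k : Int) + 1) else none := by
  obtain ⟨hlt, hpk, hprev⟩ := List.findIdx?_eq_some_iff_getElem.mp hk
  intro m
  induction m with
  | zero =>
    intro an han
    have hak : an = k := by omega
    subst hak
    by_cases hn : (an : Int) < n
    · rw [PySem.List.pyRange_one_cons hn]
      simp [pvALoop, PySem.List.pyGet?_natCast, List.getElem?_eq_getElem hlt, hpk, hn]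
    · rw [PySem.List.pyRange_one_eq_nil (by omega)]
      simp [pvALoop, hn]
  | succ m ih =>
    intro an han
    have hak : an < k := by omega
    by_cases hn : (an : Int) < n
    · rw [PySem.List.pyRange_one_cons hn]
      have : pvMatch label (ro[an]'(by omega)) = false := by
        simpa using hprev an hak
      simp only [pvALoop, PySem.List.pyGet?_natCast,
        List.getElem?_eq_getElem (show an < ro.length by omega), this, Bool.false_eq_true, if_false]
      have := ih (an + 1) (by omega)
      simpa using this
    · rw [PySem.List.pyRange_one_eq_nil (by omega)]
      have : ¬ ((k : Int) < n) := by omega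
      simp [pvALoop, this]

-- ===== VERDICT (by name: the statement is the Claim_ definition above) =====
theorem top_n_retrieved_spec : Claim_equal_top_n_retrieved := by
  intro ro label n _ _
  unfold Spec_top_n_retrieved top_n_retrieved top_n_retrieved_alt
  rw [pvBLoop_eq_findIdx?]
  cases h : ro.findIdx? (pvMatch label) with
  | none =>
    have : ro.any (pvMatch label) = false := by
      simp only [List.any_eq_false]
      simpa [Bool.not_eq_true] using List.findIdx?_eq_none_iff.mp h
    simp [this]
  | some k =>
    have hany : ro.any (pvMatch label) = true := by
      obtain ⟨hlt, hpk, _⟩ := List.findIdx?_eq_some_iff_getElem.mp h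
      exact List.any_eq_true.mpr ⟨ro[k], List.getElem_mem hlt, hpk⟩
    have := pvALoop_range ro label n k h k 0 (by omega)
    simp only [hany, Nat.cast_zero] at this ⊢
    simp [this]
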